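-- pv_equiv track=rewrite | github.com/Xelerezex/learning-space | stepik-courses/stepik-python-basis-&-application/1-basic-principals/1.6.class-inheritance/step-7/main.py | found_path
-- ===== SOURCE A (Python) =====
-- def found_path(classes, start, end, path=[]):
--     path = path + [start]
--     if start == end:
--         return path
--     if start not in classes:
--         return None
--     for node in classes[start]:
--         if node not in path:
--             newpath = found_path(classes, node, end, path)
--             if newpath:
--                 return newpath
--     return None
-- ===== SOURCE B (Python) =====
-- def found_path(classes, start, end, path=[]):
--     stack = [(start, path)]
--     while stack:
--         node, p = stack.pop()
--         newpath = p + [node]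
--         if node == end:
--             return newpath
--         if node not in classes:
--             continue
--         for nb in reversed(classes[node]):
--             if nb not in newpath:
--                 stack.append((nb, newpath))
--     return None
-- ===== Notes on version B (the rewrite author's own statement) =====
-- stated objective: alternative
-- what changed: Replaced A's recursive backtracking DFS (implicit call-stack, per-frame for-loop with early return) by an iterative DFS over an explicit stack of (node, path) frames, pushing the filtered neighbours in reverse so the same first path is returned.
import Mathlib
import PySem

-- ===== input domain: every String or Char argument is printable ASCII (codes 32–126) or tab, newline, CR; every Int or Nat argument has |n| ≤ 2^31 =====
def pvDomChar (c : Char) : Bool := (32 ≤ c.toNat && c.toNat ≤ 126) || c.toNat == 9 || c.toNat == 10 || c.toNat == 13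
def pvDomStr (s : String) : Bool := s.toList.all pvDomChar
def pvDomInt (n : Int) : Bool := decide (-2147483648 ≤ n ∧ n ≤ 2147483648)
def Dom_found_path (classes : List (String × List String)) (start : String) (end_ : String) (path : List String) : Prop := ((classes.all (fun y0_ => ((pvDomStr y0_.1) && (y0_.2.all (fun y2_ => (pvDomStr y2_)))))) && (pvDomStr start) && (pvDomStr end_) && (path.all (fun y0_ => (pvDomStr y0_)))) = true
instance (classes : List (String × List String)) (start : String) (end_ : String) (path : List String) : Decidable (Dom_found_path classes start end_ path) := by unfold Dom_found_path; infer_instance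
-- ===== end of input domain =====

-- B replaces A's recursive DFS by an explicit stack-based iterative DFS returning the same first path (different decomposition; no speed claim).
-- Every occurrence of a key and of a neighbour of `classes`, in order (used only to compute a sufficient fuel bound for the ports).
def nodesOf (classes : List (String × List String)) : List String :=
  classes.flatMap (fun kv => kv.1 :: kv.2)

-- ===== PORT A =====
-- A's recursion, literal; the fuel argument is only a totality guard ((nodesOf classes).length + 1 is
-- proved sufficient below: each recursion level adds to `path` a node of `classes` not yet in it).
mutual
def afuel (classes : List (String × List String)) (end_ : String) : Nat → String → List String → Option (List String)
  | 0, _, _ => none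
  | f+1, start, path =>
    let path' := path ++ [start]            -- path = path + [start]
    if start = end_ then some path'         -- if start == end: return path
    else
      match List.lookup start classes with  -- if start not in classes: return None
      | none => none
      | some ns => goA classes end_ f path' ns   -- for node in classes[start]: …
termination_by fuel _ _ => (fuel, 0)

-- the body of A's for-loop
def goA (classes : List (String × List String)) (end_ : String) (f : Nat) (path' : List String) : List String → Option (List String)
  | [] => none                              -- loop ended: return None
  | node :: rest =>
    if node ∉ path' then                    -- if node not in path:
      match afuel classes end_ f node path' with   -- newpath = found_path(classes, node, end, path)
      | some np => if np.isEmpty then goA classes end_ f path' rest else some np   -- if newpath: return newpath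
      | none => goA classes end_ f path' rest
    else goA classes end_ f path' rest
termination_by ns => (f, ns.length + 1)
end

def found_path (classes : List (String × List String)) (start : String) (end_ : String) (path : List String) : Option (List String) :=
  afuel classes end_ ((nodesOf classes).length + 1) start path

-- ===== PORT B =====
-- B's while-loop over an explicit stack (list head = stack top); the fuel argument is only a totality
-- guard (each iteration strictly decreases a cost which the chosen fuel is proved to bound below).
def bloop (classes : List (String × List String)) (end_ : String) : Nat → List (String × List String) → Option (List String)
  | 0, _ => none
  | _+1, [] => none                          -- while stack: … ; return None
  | f+1, (node, p) :: rest =>                -- node, p = stack.pop()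
    let newpath := p ++ [node]               -- newpath = p + [node]
    if node = end_ then some newpath         -- if node == end: return newpath
    else
      match List.lookup node classes with    -- if node not in classes: continue
      | none => bloop classes end_ f rest
      | some ns =>                           -- for nb in reversed(classes[node]): if nb not in newpath: stack.append(…)
        bloop classes end_ f
          ((ns.filter (fun nb => nb ∉ newpath)).reverse.foldl (fun st nb => (nb, newpath) :: st) rest)

def found_path_alt (classes : List (String × List String)) (start : String) (end_ : String) (path : List String) : Option (List String) :=
  let K := (nodesOf classes).length
  bloop classes end_ (1 + (K + 2) ^ (K + 1)) [(start, path)]   -- stack = [(start, path)]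

-- ===== PRECONDITION & SPEC =====
def Spec_found_path (classes : List (String × List String)) (start : String) (end_ : String) (path : List String) (out : Option (List String)) : Prop := out = found_path_alt classes start end_ path
instance (classes : List (String × List String)) (start : String) (end_ : String) (path : List String) (out : Option (List String)) : Decidable (Spec_found_path classes start end_ path out) := by unfold Spec_found_path; infer_instance

-- ===== CLAIM (what is proved, stated in full; the proofs are below) =====
def Claim_equal_found_path : Prop := ∀ (classes : List (String × List String)) (start : String) (end_ : String) (path : List String), Dom_found_path classes start end_ path → Spec_found_path classes start end_ path (found_path classes start end_ path)

-- ===== LEMMAS AND PROOFS =====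

-- occurrences in nodesOf still outside q: the termination measure of the DFS
def cNot (classes : List (String × List String)) (q : List String) : Nat :=
  (nodesOf classes).countP (fun x => decide (x ∉ q))

-- ghost cost of one stack frame / of a stack (pays for the frame and everything it can push)
def frCost (classes : List (String × List String)) (e : String × List String) : Nat :=
  ((nodesOf classes).length + 2) ^ (cNot classes (e.2 ++ [e.1]) + 1)

def stackCost (classes : List (String × List String)) (st : List (String × List String)) : Nat :=
  st.length + (st.map (frCost classes)).sum

-- first result of A over the frames of a stack: what B's loop computes
def stackSpec (classes : List (String × List String)) (end_ : String) : List (String × List String) → Option (List String)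
  | [] => none
  | e :: rest =>
    match found_path classes e.1 end_ e.2 with
    | some r => some r
    | none => stackSpec classes end_ rest

lemma mem_of_lookup_eq_some {a : String} {b : List String} {l : List (String × List String)}
    (h : List.lookup a l = some b) : (a, b) ∈ l := by
  induction l with
  | nil => simp [List.lookup] at h
  | cons hd tl ih =>
    rw [List.lookup_cons] at h
    split at h
    · next heq =>
      obtain ⟨h1, h2⟩ := hd
      simp at heq
      simp_all
    · exact List.mem_cons_of_mem _ (ih h)

lemma mem_nodesOf_of_lookup {classes : List (String × List String)} {a : String} {ns : List String}
    (h : List.lookup a classes = some ns) : ∀ x, (x = a ∨ x ∈ ns) → x ∈ nodesOf classes := by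
  intro x hx
  unfold nodesOf
  refine List.mem_flatMap.mpr ⟨(a, ns), mem_of_lookup_eq_some h, ?_⟩
  rcases hx with h1 | h2
  · subst h1
    exact List.mem_cons_self
  · exact List.mem_cons_of_mem _ h2

lemma length_lt_of_mem {classes : List (String × List String)} {a : String} {ns : List String}
    (hmem : (a, ns) ∈ classes) : ns.length < (nodesOf classes).length := by
  induction classes with
  | nil => simp at hmem
  | cons hd tl ih =>
    rcases List.mem_cons.mp hmem with h1 | h2
    · simp [nodesOf, List.flatMap_cons, ← h1]
    · have := ih h2
      simp only [nodesOf, List.flatMap_cons, List.length_append, List.length_cons] at this ⊢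
      omega

lemma countP_strict_lt {l : List String} {p q : String → Bool}
    (hpq : ∀ a, p a = true → q a = true) {x : String} (hx : x ∈ l)
    (hpx : p x = false) (hqx : q x = true) : l.countP p < l.countP q := by
  induction l with
  | nil => simp at hx
  | cons hd tl ih =>
    rw [List.countP_cons, List.countP_cons]
    have hmono : tl.countP p ≤ tl.countP q := List.countP_mono_left fun a _ => hpq a
    rcases List.mem_cons.mp hx with h1 | h2
    · subst h1
      rw [hpx, hqx]
      simp
      omega
    · have := ih h2
      by_cases hp : p hd = true
      · rw [hp, hpq hd hp]; omega
      · rw [Bool.not_eq_true] at hp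
        rw [hp]
        simp only [Bool.false_eq_true, if_false]
        split <;> omega

lemma cNot_append_lt {classes : List (String × List String)} {q : List String} {x : String}
    (hx : x ∈ nodesOf classes) (hq : x ∉ q) : cNot classes (q ++ [x]) < cNot classes q := by
  unfold cNot
  refine countP_strict_lt (fun a ha => ?_) hx (by simp) (by simp [hq])
  simp only [decide_eq_true_eq] at ha ⊢
  intro hmem
  exact ha (List.mem_append_left _ hmem)

lemma cNot_le (classes : List (String × List String)) (q : List String) :
    cNot classes q ≤ (nodesOf classes).length :=
  List.countP_le_length

-- goA never returns `some []` (because of the `if newpath:` truthiness test)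
lemma goA_some_ne_nil {classes : List (String × List String)} {end_ : String} {f : Nat}
    {path' : List String} {ns : List String} {r : List String}
    (h : goA classes end_ f path' ns = some r) : r ≠ [] := by
  induction ns with
  | nil => rw [goA] at h; exact absurd h (by simp)
  | cons node rest ih =>
    rw [goA] at h
    split at h
    · split at h
      · split at h
        · exact ih h
        · next hne =>
          injection h with h'
          subst h'
          simpa using hne
      · exact ih h
    · exact ih h

-- stability: any two sufficient fuels give the same result
lemma afuel_stable (classes : List (String × List String)) (end_ : String) :
    ∀ f g start path, cNot classes (path ++ [start]) < f → cNot classes (path ++ [start]) < g →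
      afuel classes end_ f start path = afuel classes end_ g start path := by
  intro f
  induction f using Nat.strong_induction_on with
  | _ f ih =>
    intro g start path hf hg
    match f, g with
    | 0, _ => omega
    | _ + 1, 0 => omega
    | f' + 1, g' + 1 =>
      rw [afuel, afuel]
      by_cases hse : start = end_
      · simp [hse]
      · simp only [hse, if_false]
        cases hlk : List.lookup start classes with
        | none => rfl
        | some ns =>
          simp only []
          have hc : cNot classes (path ++ [start]) ≤ f' := by omega
          have hcg : cNot classes (path ++ [start]) ≤ g' := by omega
          have hmem : ∀ x ∈ ns, x ∈ nodesOf classes :=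
            fun x hx => mem_nodesOf_of_lookup hlk x (Or.inr hx)
          clear hlk
          induction ns with
          | nil => rw [goA, goA]
          | cons node rest ihn =>
            rw [goA, goA]
            have hmemrest : ∀ x ∈ rest, x ∈ nodesOf classes :=
              fun x hx => hmem x (List.mem_cons_of_mem _ hx)
            by_cases hnp : node ∉ path ++ [start]
            · rw [if_pos hnp, if_pos hnp]
              have hnode : node ∈ nodesOf classes := hmem node List.mem_cons_self
              have hlt : cNot classes ((path ++ [start]) ++ [node]) < cNot classes (path ++ [start]) :=
                cNot_append_lt hnode hnp
              have heqrec : afuel classes end_ f' node (path ++ [start]) =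
                  afuel classes end_ g' node (path ++ [start]) :=
                ih f' (by omega) g' node (path ++ [start]) (by omega) (by omega)
              rw [heqrec]
              cases afuel classes end_ g' node (path ++ [start]) with
              | none => exact ihn hmemrest
              | some np =>
                dsimp only
                split
                · exact ihn hmemrest
                · rfl
            · rw [if_neg hnp, if_neg hnp]
              exact ihn hmemrest

-- goA with sufficient fuel computes stackSpec of the frames it would push
lemma goA_eq_stackSpec (classes : List (String × List String)) (end_ : String) :
    ∀ f (path' ns : List String), (∀ x ∈ ns, x ∈ nodesOf classes) → cNot classes path' ≤ f →
      goA classes end_ f path' ns =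
        stackSpec classes end_ ((ns.filter (fun nb => nb ∉ path')).map (fun nb => (nb, path'))) := by
  intro f path' ns
  induction ns with
  | nil =>
    intro _ _
    rw [goA]
    simp [stackSpec]
  | cons node rest ih =>
    intro hmem hf
    have hmemrest : ∀ x ∈ rest, x ∈ nodesOf classes :=
      fun x hx => hmem x (List.mem_cons_of_mem _ hx)
    rw [goA, List.filter_cons]
    by_cases hnp : node ∉ path'
    · rw [if_pos hnp]
      have hnode : node ∈ nodesOf classes := hmem node List.mem_cons_self
      have hlt : cNot classes (path' ++ [node]) < cNot classes path' := cNot_append_lt hnode hnp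
      have hstab : afuel classes end_ f node path' =
          afuel classes end_ ((nodesOf classes).length + 1) node path' :=
        afuel_stable classes end_ f ((nodesOf classes).length + 1) node path'
          (by omega) (by have := cNot_le classes (path' ++ [node]); omega)
      have hdec : (decide (node ∉ path')) = true := by simpa using hnp
      simp only [hdec, if_true, List.map_cons]
      rw [stackSpec]
      rw [hstab]
      unfold found_path
      cases hres : afuel classes end_ ((nodesOf classes).length + 1) node path' with
      | none => exact ih hmemrest hf
      | some np =>
        have hnp' : np ≠ [] := by
          rw [afuel] at hres
          split at hres
          · injection hres with h'
            subst h'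
            simp
          · split at hres
            · exact absurd hres (by simp)
            · exact goA_some_ne_nil hres
        dsimp only
        rw [if_neg (by simpa using hnp')]
    · rw [if_neg hnp]
      have hdec : (decide (node ∉ path')) = false := by simpa using not_not.mp (by simpa using hnp)
      simp only [hdec, Bool.false_eq_true, if_false]
      exact ih hmemrest hf

lemma stackSpec_append (classes : List (String × List String)) (end_ : String)
    (xs ys : List (String × List String)) :
    stackSpec classes end_ (xs ++ ys) =
      match stackSpec classes end_ xs with
      | some r => some r
      | none => stackSpec classes end_ ys := by
  induction xs with
  | nil => simp [stackSpec]
  | cons hd tl ih =>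
    rw [List.cons_append, stackSpec, stackSpec]
    cases found_path classes hd.1 end_ hd.2 with
    | some r => rfl
    | none => exact ih

lemma stackCost_append (classes : List (String × List String))
    (xs ys : List (String × List String)) :
    stackCost classes (xs ++ ys) = stackCost classes xs + stackCost classes ys := by
  unfold stackCost
  simp
  omega

lemma push_fold_eq {ns : List String} {newpath : List String} {rest : List (String × List String)} :
    (ns.filter (fun nb => nb ∉ newpath)).reverse.foldl (fun st nb => (nb, newpath) :: st) rest =
      (ns.filter (fun nb => nb ∉ newpath)).map (fun nb => (nb, newpath)) ++ rest := by
  rw [← List.foldr_eq_foldl_reverse]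
  exact List.foldr_cons_eq_append

-- the main loop invariant of B: with sufficient fuel, bloop computes stackSpec
lemma bloop_eq_stackSpec (classes : List (String × List String)) (end_ : String) :
    ∀ fuel st, stackCost classes st ≤ fuel →
      bloop classes end_ fuel st = stackSpec classes end_ st := by
  intro fuel
  induction fuel with
  | zero =>
    intro st hst
    cases st with
    | nil => rw [bloop]; simp [stackSpec]
    | cons hd tl =>
      unfold stackCost at hst
      simp at hst
  | succ f ih =>
    intro st hst
    cases st with
    | nil => rw [bloop]; simp [stackSpec]
    | cons hd rest =>
      obtain ⟨node, p⟩ := hd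
      have hfrpos : 0 < frCost classes (node, p) := Nat.pow_pos (by omega)
      have hcost : stackCost classes ((node, p) :: rest) =
          1 + frCost classes (node, p) + stackCost classes rest := by
        unfold stackCost
        simp
        omega
      rw [bloop, stackSpec]
      unfold found_path
      rw [afuel]
      by_cases hne : node = end_
      · simp [hne]
      · simp only [hne, if_false]
        cases hlk : List.lookup node classes with
        | none =>
          dsimp only
          exact ih rest (by omega)
        | some ns =>
          dsimp only
          rw [push_fold_eq]
          set pushed := (ns.filter (fun nb => nb ∉ (p ++ [node]))).map (fun nb => (nb, p ++ [node])) with hpushed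
          have hmem : ∀ x ∈ ns, x ∈ nodesOf classes :=
            fun x hx => mem_nodesOf_of_lookup hlk x (Or.inr hx)
          have hKns : ns.length < (nodesOf classes).length := length_lt_of_mem (mem_of_lookup_eq_some hlk)
          -- cost bound: the pushed frames plus one step are paid for by the popped frame
          have hcost2 : stackCost classes pushed + 1 ≤ frCost classes (node, p) := by
            set K := (nodesOf classes).length with hK
            set e0 := cNot classes (p ++ [node]) with he0
            have hfr : frCost classes (node, p) = (K + 2) ^ (e0 + 1) := rfl
            by_cases hemp : (ns.filter (fun nb => nb ∉ (p ++ [node]))) = []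
            · have hp0 : pushed = [] := by rw [hpushed, hemp]; rfl
              rw [hp0, hfr]
              have hpos : 0 < (K + 2) ^ (e0 + 1) := Nat.pow_pos (by omega)
              unfold stackCost
              simp
              omega
            · obtain ⟨nb0, hnb0⟩ := List.exists_mem_of_ne_nil _ hemp
              have hnb0' := List.mem_filter.mp hnb0
              have he0pos : 1 ≤ e0 := by
                rw [he0]
                unfold cNot
                have : 0 < (nodesOf classes).countP (fun x => decide (x ∉ p ++ [node])) :=
                  List.countP_pos_iff.mpr ⟨nb0, hmem nb0 hnb0'.1, hnb0'.2⟩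
                omega
              have hlenp : pushed.length ≤ ns.length := by
                rw [hpushed, List.length_map]
                exact List.length_filter_le _ _
              have hbound : ∀ c ∈ pushed.map (frCost classes), c ≤ (K + 2) ^ e0 := by
                intro c hc
                rw [hpushed, List.map_map] at hc
                obtain ⟨nb, hnb, hceq⟩ := List.mem_map.mp hc
                have hnb' := List.mem_filter.mp hnb
                have hlt : cNot classes ((p ++ [node]) ++ [nb]) < e0 := by
                  rw [he0]
                  exact cNot_append_lt (hmem nb hnb'.1) (by simpa using hnb'.2)
                have hcval : frCost classes (nb, p ++ [node]) =
                    (K + 2) ^ (cNot classes ((p ++ [node]) ++ [nb]) + 1) := rfl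
                rw [← hceq]
                simp only [Function.comp]
                rw [hcval]
                exact Nat.pow_le_pow_right (by omega) (by omega)
              have hsum : (pushed.map (frCost classes)).sum ≤ pushed.length * ((K + 2) ^ e0) := by
                have h := List.sum_le_card_nsmul (pushed.map (frCost classes)) ((K + 2) ^ e0) hbound
                simpa [List.length_map] using h
              have hX : (K + 2) ≤ (K + 2) ^ e0 := by
                calc (K + 2) = (K + 2) ^ 1 := (pow_one _).symm
                  _ ≤ (K + 2) ^ e0 := Nat.pow_le_pow_right (by omega) he0pos
              have h3 : (K + 2) ^ (e0 + 1) = K * (K + 2) ^ e0 + 2 * (K + 2) ^ e0 := by ring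
              have h2 : (pushed.map (frCost classes)).sum ≤ K * ((K + 2) ^ e0) :=
                le_trans hsum (Nat.mul_le_mul_right _ (by omega))
              unfold stackCost
              rw [hfr]
              omega
          rw [ih _ (by rw [stackCost_append]; omega)]
          rw [stackSpec_append]
          have hgo : goA classes end_ ((nodesOf classes).length) (p ++ [node]) ns =
              stackSpec classes end_ pushed := by
            rw [hpushed]
            exact goA_eq_stackSpec classes end_ _ _ _ hmem
              (by have := cNot_le classes (p ++ [node]); omega)
          rw [← hgo]

-- ===== VERDICT (by name: the statement is the Claim_ definition above) =====
theorem found_path_spec : Claim_equal_found_path := by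
  unfold Claim_equal_found_path
  intro classes start end_ path _
  unfold Spec_found_path found_path_alt
  dsimp only
  rw [bloop_eq_stackSpec]
  · rw [stackSpec]
    cases found_path classes start end_ path with
    | some r => rfl
    | none => rw [stackSpec]
  · unfold stackCost frCost
    simp
    have h1 : cNot classes (path ++ [start]) + 1 ≤ (nodesOf classes).length + 1 := by
      have := cNot_le classes (path ++ [start])
      omega
    exact Nat.pow_le_pow_right (by omega) h1
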